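-- pv_equiv track=rewrite | github.com/AndyYangBest/sf_aisql_innovation_challenge | core/src/app/orchestration/column_workflow_tools/base.py | _split_table_ref
-- ===== SOURCE A (Python) =====
-- def _split_table_ref(table_ref: str) -> list[str]:
--     parts: list[str] = []
--     buf: list[str] = []
--     in_quotes = False
--     for ch in str(table_ref):
--         if ch == '"':
--             in_quotes = not in_quotes
--         if ch == "." and not in_quotes:
--             parts.append("".join(buf).strip())
--             buf = []
--             continue
--         buf.append(ch)
--     if buf:
--         parts.append("".join(buf).strip())
--     return [part for part in parts if part]
-- ===== SOURCE B (Python) =====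
-- def _split_table_ref(table_ref: str) -> list[str]:
--     parts: list[str] = []
--     cur = ""
--     in_quotes = False
--     rest = str(table_ref)
--     while True:
--         chunk, quote, rest = rest.partition('"')
--         if in_quotes:
--             cur += chunk
--         else:
--             while True:
--                 piece, dot, chunk = chunk.partition(".")
--                 cur += piece
--                 if not dot:
--                     break
--                 parts.append(cur)
--                 cur = ""
--         if not quote:
--             parts.append(cur)
--             break
--         cur += '"'
--         in_quotes = not in_quotes
--     return [p.strip() for p in parts if p.strip()]
-- ===== Notes on version B (the rewrite author's own statement) =====
-- stated objective: faster
-- what changed: Replaces the per-character scan with a quote-toggle flag and a char-by-char buffer by chunk-wise processing: repeatedly partition the string at the next quote character to isolate quoted/unquoted chunks, and split unquoted chunks at dots to emit parts, with the same strip-and-filter finish.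
import Mathlib
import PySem

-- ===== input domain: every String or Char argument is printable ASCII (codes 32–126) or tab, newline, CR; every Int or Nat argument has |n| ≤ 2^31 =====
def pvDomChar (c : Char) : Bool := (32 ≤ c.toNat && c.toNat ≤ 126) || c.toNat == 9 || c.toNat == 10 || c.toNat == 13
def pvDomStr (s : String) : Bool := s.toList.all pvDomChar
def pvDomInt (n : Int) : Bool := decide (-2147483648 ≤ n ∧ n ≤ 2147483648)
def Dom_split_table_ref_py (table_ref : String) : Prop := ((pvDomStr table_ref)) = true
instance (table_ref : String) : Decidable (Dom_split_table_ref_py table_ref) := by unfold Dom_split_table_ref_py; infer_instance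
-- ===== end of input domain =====

-- B replaces A's per-character scan (quote flag + char buffer) by chunk-wise processing: it
-- repeatedly partitions the string at the next quote character and splits unquoted chunks at dots,
-- with the same strip-then-filter finish (measured faster in a timing run: bulk str ops
-- instead of a per-character Python loop). Proved: identical return value on every input.

-- ===== PORT A =====
-- the for-loop of A over the characters, state (buf, in_quotes); emitted parts are consed;
-- the trailing 'if buf: parts.append(...)' is the base case
def aRun : List Char → List Char → Bool → List (List Char)
  | [], buf, _ => if buf = [] then [] else [PySem.Chars.strip buf]
  | ch :: t, buf, inq =>
    let inq' := if ch = '"' then !inq else inq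
    if ch = '.' ∧ inq' = false then PySem.Chars.strip buf :: aRun t [] inq'
    else aRun t (buf ++ [ch]) inq'

def split_table_ref_py (table_ref : String) : List String :=
  ((aRun table_ref.toList [] false).filter (· ≠ [])).map (fun l => String.ofList l)

-- ===== PORT B =====
-- the inner 'while True: piece, dot, chunk = chunk.partition(".")' loop of B:
-- returns (parts emitted by this loop, final cur); partition is takeWhile/dropWhile
def bDots (chunk cur : List Char) : List (List Char) × List Char :=
  let piece := chunk.takeWhile (· ≠ '.')
  match h : chunk.dropWhile (· ≠ '.') with
  | [] => ([], cur ++ piece)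
  | _ :: rest =>
    let r := bDots rest []
    ((cur ++ piece) :: r.1, r.2)
termination_by chunk.length
decreasing_by
  have hle := List.length_dropWhile_le (fun x => decide ¬x = '.') chunk
  rw [h] at hle
  simp at hle ⊢
  omega

-- the outer 'while True: chunk, quote, rest = rest.partition('"')' loop of B, state (cur, in_quotes);
-- the Python if/else on in_quotes is the Bool scrutinee of the match
def bLoop (s cur : List Char) (inq : Bool) : List (List Char) :=
  let chunk := s.takeWhile (· ≠ '"')
  match h : s.dropWhile (· ≠ '"'), inq with
  | [], true => [cur ++ chunk]
  | [], false => (bDots chunk cur).1 ++ [(bDots chunk cur).2]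
  | _ :: rest, true => bLoop rest (cur ++ chunk ++ ['"']) false
  | _ :: rest, false => (bDots chunk cur).1 ++ bLoop rest ((bDots chunk cur).2 ++ ['"']) true
termination_by s.length
decreasing_by
  all_goals
    have hle := List.length_dropWhile_le (fun x => decide ¬x = '"') s
    rw [h] at hle
    simp at hle ⊢
    omega

def split_table_ref_py_alt (table_ref : String) : List String :=
  (((bLoop table_ref.toList [] false).map PySem.Chars.strip).filter (· ≠ [])).map
    (fun l => String.ofList l)

-- ===== PRECONDITION & SPEC =====
def Spec_split_table_ref_py (table_ref : String) (out : List String) : Prop := out = split_table_ref_py_alt table_ref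
instance (table_ref : String) (out : List String) : Decidable (Spec_split_table_ref_py table_ref out) := by unfold Spec_split_table_ref_py; infer_instance

-- ===== CLAIM (what is proved, stated in full; the proofs are below) =====
def Claim_equal_split_table_ref_py : Prop := ∀ (table_ref : String), Dom_split_table_ref_py table_ref → Spec_split_table_ref_py table_ref (split_table_ref_py table_ref)

-- ===== LEMMAS AND PROOFS =====

theorem aRun_nil (buf : List Char) (inq : Bool) :
    aRun [] buf inq = if buf = [] then [] else [PySem.Chars.strip buf] := by
  rw [aRun]

theorem aRun_quote (t buf : List Char) (inq : Bool) :
    aRun ('"' :: t) buf inq = aRun t (buf ++ ['"']) (!inq) := by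
  rw [aRun]; simp

theorem aRun_dot_true (t buf : List Char) :
    aRun ('.' :: t) buf true = aRun t (buf ++ ['.']) true := by
  rw [aRun]; simp

theorem aRun_dot_false (t buf : List Char) :
    aRun ('.' :: t) buf false = PySem.Chars.strip buf :: aRun t [] false := by
  rw [aRun]; simp

theorem aRun_other (c : Char) (hd : c ≠ '.') (hq : c ≠ '"') (t buf : List Char) (inq : Bool) :
    aRun (c :: t) buf inq = aRun t (buf ++ [c]) inq := by
  rw [aRun]; simp [hd, hq]

theorem bDots_nil (cur : List Char) : bDots [] cur = ([], cur) := by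
  rw [bDots.eq_def]; simp

theorem bDots_dot (l cur : List Char) :
    bDots ('.' :: l) cur = (cur :: (bDots l []).1, (bDots l []).2) := by
  rw [bDots.eq_def]
  split
  · next h => simp at h
  · next head rest h =>
      simp only [List.dropWhile_cons] at h
      simp at h
      obtain ⟨h1, h2⟩ := h
      subst h1; subst h2
      simp

theorem bDots_cons (c : Char) (hc : c ≠ '.') (l cur : List Char) :
    bDots (c :: l) cur = bDots l (cur ++ [c]) := by
  conv_lhs => rw [bDots.eq_def]
  conv_rhs => rw [bDots.eq_def]
  have hdw : List.dropWhile (fun x => decide ¬x = '.') (c :: l)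
      = List.dropWhile (fun x => decide ¬x = '.') l := by
    simp [hc]
  have htw : List.takeWhile (fun x => decide ¬x = '.') (c :: l)
      = c :: List.takeWhile (fun x => decide ¬x = '.') l := by
    simp [hc]
  split
  · next h =>
      rw [hdw] at h
      split
      · next h2 => rw [htw]; simp
      · next h2 => rw [h] at h2; cases h2
  · next head rest h =>
      rw [hdw] at h
      split
      · next h2 => rw [h2] at h; cases h
      · next head2 rest2 h2 =>
          rw [h2] at h
          injection h with h3 h4
          subst h3; subst h4
          rw [htw]; simp


theorem bLoop_nil (cur : List Char) (inq : Bool) : bLoop [] cur inq = [cur] := by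
  rw [bLoop.eq_def]
  cases inq <;> simp [bDots_nil]

theorem bLoop_quote (t cur : List Char) (inq : Bool) :
    bLoop ('"' :: t) cur inq = bLoop t (cur ++ ['"']) (!inq) := by
  conv_lhs => rw [bLoop.eq_def]
  split
  · next h => simp at h
  · next h => simp at h
  · next head rest h =>
      simp only [List.dropWhile_cons] at h
      simp at h
      obtain ⟨h1, h2⟩ := h
      subst h1; subst h2
      simp
  · next head rest h =>
      simp only [List.dropWhile_cons] at h
      simp at h
      obtain ⟨h1, h2⟩ := h
      subst h1; subst h2
      simp [bDots_nil]

theorem bLoop_cons_true (c : Char) (hq : c ≠ '"') (t cur : List Char) :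
    bLoop (c :: t) cur true = bLoop t (cur ++ [c]) true := by
  conv_lhs => rw [bLoop.eq_def]
  conv_rhs => rw [bLoop.eq_def]
  have hdw : List.dropWhile (fun x => decide ¬x = '"') (c :: t)
      = List.dropWhile (fun x => decide ¬x = '"') t := by
    simp [hq]
  have htw : List.takeWhile (fun x => decide ¬x = '"') (c :: t)
      = c :: List.takeWhile (fun x => decide ¬x = '"') t := by
    simp [hq]
  split
  · next h hb =>
      rw [hdw] at h
      split
      · next h2 hb2 => rw [htw]; simp 
      · next h2 hb2 => exact Bool.noConfusion hb2
      · next head2 rest2 h2 hb2 => rw [h] at h2; cases h2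
      · next head2 rest2 h2 hb2 => rw [h] at h2; cases h2
  · next h hb =>
      exact Bool.noConfusion hb
  · next head rest h hb =>
      rw [hdw] at h
      split
      · next h2 hb2 => rw [h2] at h; cases h
      · next h2 hb2 => rw [h2] at h; cases h
      · next head2 rest2 h2 hb2 =>
          rw [h2] at h
          injection h with h3 h4
          subst h3; subst h4
          rw [htw]; simp 
      · next head2 rest2 h2 hb2 =>
          exact Bool.noConfusion hb2
  · next head rest h hb =>
      exact Bool.noConfusion hb

theorem bLoop_dot (t cur : List Char) :
    bLoop ('.' :: t) cur false = cur :: bLoop t [] false := by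
  conv_lhs => rw [bLoop.eq_def]
  conv_rhs => rw [bLoop.eq_def]
  have hdw : List.dropWhile (fun x => decide ¬x = '"') ('.' :: t)
      = List.dropWhile (fun x => decide ¬x = '"') t := by
    simp 
  have htw : List.takeWhile (fun x => decide ¬x = '"') ('.' :: t)
      = '.' :: List.takeWhile (fun x => decide ¬x = '"') t := by
    simp 
  split
  · next h hb =>
      exact Bool.noConfusion hb
  · next h hb =>
      rw [hdw] at h
      split
      · next h2 hb2 => exact Bool.noConfusion hb2
      · next h2 hb2 => rw [htw]; simp [bDots_dot]
      · next head2 rest2 h2 hb2 => rw [h] at h2; cases h2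
      · next head2 rest2 h2 hb2 => rw [h] at h2; cases h2
  · next head rest h hb =>
      exact Bool.noConfusion hb
  · next head rest h hb =>
      rw [hdw] at h
      split
      · next h2 hb2 => rw [h2] at h; cases h
      · next h2 hb2 => rw [h2] at h; cases h
      · next head2 rest2 h2 hb2 =>
          exact Bool.noConfusion hb2
      · next head2 rest2 h2 hb2 =>
          rw [h2] at h
          injection h with h3 h4
          subst h3; subst h4
          rw [htw]; simp [bDots_dot]

theorem bLoop_cons_false (c : Char) (hq : c ≠ '"') (hd : c ≠ '.') (t cur : List Char) :
    bLoop (c :: t) cur false = bLoop t (cur ++ [c]) false := by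
  conv_lhs => rw [bLoop.eq_def]
  conv_rhs => rw [bLoop.eq_def]
  have hdw : List.dropWhile (fun x => decide ¬x = '"') (c :: t)
      = List.dropWhile (fun x => decide ¬x = '"') t := by
    simp [hq]
  have htw : List.takeWhile (fun x => decide ¬x = '"') (c :: t)
      = c :: List.takeWhile (fun x => decide ¬x = '"') t := by
    simp [hq]
  split
  · next h hb =>
      exact Bool.noConfusion hb
  · next h hb =>
      rw [hdw] at h
      split
      · next h2 hb2 => exact Bool.noConfusion hb2
      · next h2 hb2 => rw [htw]; simp [bDots_cons c hd]
      · next head2 rest2 h2 hb2 => rw [h] at h2; cases h2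
      · next head2 rest2 h2 hb2 => rw [h] at h2; cases h2
  · next head rest h hb =>
      exact Bool.noConfusion hb
  · next head rest h hb =>
      rw [hdw] at h
      split
      · next h2 hb2 => rw [h2] at h; cases h
      · next h2 hb2 => rw [h2] at h; cases h
      · next head2 rest2 h2 hb2 =>
          exact Bool.noConfusion hb2
      · next head2 rest2 h2 hb2 =>
          rw [h2] at h
          injection h with h3 h4
          subst h3; subst h4
          rw [htw]; simp [bDots_cons c hd]

theorem strip_nil_pv : PySem.Chars.strip [] = [] := by decide

theorem main_equiv (n : Nat) : ∀ (s : List Char), s.length ≤ n → ∀ (cur : List Char) (inq : Bool),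
    (aRun s cur inq).filter (· ≠ []) =
      ((bLoop s cur inq).map PySem.Chars.strip).filter (· ≠ []) := by
  induction n with
  | zero =>
    intro s hs cur inq
    have h0 : s = [] := by cases s <;> simp_all
    subst h0
    rw [bLoop_nil, aRun_nil]
    by_cases h : cur = []
    · subst h; simp [strip_nil_pv]
    · simp [h]
  | succ n ih =>
    intro s hs cur inq
    match s with
    | [] =>
      rw [bLoop_nil, aRun_nil]
      by_cases h : cur = []
      · subst h; simp [strip_nil_pv]
      · simp [h]
    | c :: t =>
      have ht : t.length ≤ n := by simp at hs; omega
      by_cases hq : c = '"'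
      · subst hq
        rw [bLoop_quote, aRun_quote]
        exact ih t ht (cur ++ ['"']) (!inq)
      · by_cases hd : c = '.'
        · subst hd
          cases inq with
          | true =>
            rw [bLoop_cons_true '.' hq, aRun_dot_true]
            exact ih t ht (cur ++ ['.']) true
          | false =>
            rw [bLoop_dot, aRun_dot_false]
            simp only [List.map_cons, List.filter_cons]
            rw [ih t ht [] false]
        · cases inq with
          | true =>
            rw [bLoop_cons_true c hq, aRun_other c hd hq]
            exact ih t ht (cur ++ [c]) true
          | false =>
            rw [bLoop_cons_false c hq hd, aRun_other c hd hq]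
            exact ih t ht (cur ++ [c]) false

-- ===== VERDICT (by name: the statement is the Claim_ definition above) =====
theorem split_table_ref_py_spec : Claim_equal_split_table_ref_py := by
  intro table_ref _
  unfold Spec_split_table_ref_py split_table_ref_py split_table_ref_py_alt
  rw [main_equiv table_ref.toList.length table_ref.toList le_rfl [] false]
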